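-- pv_equiv track=rewrite | github.com/huragok/LeetCode-Practce | 87 - Scramble String /ss.py | _build_hash_table
-- ===== SOURCE A (Python) =====
-- def _build_hash_table(s, alpha_to_prime):
--     n = len(s)
--     hash_table = dict()
--     for i in range(n):
--         hash_table[(i, i+1)] = alpha_to_prime[s[i]]
--     for d in range(2, n + 1):
--         for i in range(n + 1 - d):
--             hash_table[(i, i+d)] = hash_table[(i, i+d-1)] * alpha_to_prime[s[i+d-1]]
--     return hash_table
-- ===== SOURCE B (Python) =====
-- def _seg_prod(s, alpha_to_prime, i, j):
--     p = 1
--     for c in s[i:j]: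
--         p *= alpha_to_prime[c]
--     return p
--
--
-- def _build_hash_table(s, alpha_to_prime):
--     n = len(s)
--     return {(i, i + d): _seg_prod(s, alpha_to_prime, i, i + d)
--             for d in range(1, n + 1) for i in range(n + 1 - d)}
-- ===== Notes on version B (the rewrite author's own statement) =====
-- stated objective: alternative
-- what changed: Replaces the dynamic programming (each product built from the stored one-character-shorter entry read back out of hash_table) with memoryless brute force: every substring product is recomputed from scratch by a helper looping over the slice s[i:j], and the table is a single dict comprehension; this trades A's O(n^2) DP for O(n^3) recomputation with no table reads.
import Mathlib
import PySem

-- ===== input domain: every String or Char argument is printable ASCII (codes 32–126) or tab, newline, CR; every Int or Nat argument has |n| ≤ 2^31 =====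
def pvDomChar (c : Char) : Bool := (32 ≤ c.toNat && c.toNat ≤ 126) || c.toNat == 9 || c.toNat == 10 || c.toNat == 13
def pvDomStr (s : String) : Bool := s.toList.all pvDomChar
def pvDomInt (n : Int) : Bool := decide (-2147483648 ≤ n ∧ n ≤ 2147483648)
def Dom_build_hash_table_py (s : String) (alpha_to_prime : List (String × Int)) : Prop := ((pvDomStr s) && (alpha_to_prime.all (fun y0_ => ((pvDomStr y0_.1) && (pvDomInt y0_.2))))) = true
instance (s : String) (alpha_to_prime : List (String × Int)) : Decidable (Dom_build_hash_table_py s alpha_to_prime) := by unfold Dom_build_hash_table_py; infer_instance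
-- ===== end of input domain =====

-- B drops A's dynamic programming (reading the one-shorter entry back from the table) and instead
-- recomputes every substring product from scratch over the slice s[i:j]: a memoryless
-- brute-force alternative (O(n^3) instead of O(n^2)), same keys, values and insertion order.

-- ===== PORT A =====
-- alpha_to_prime[c] : Python raises KeyError when c is absent; Pre_ excludes that, default 0 is never seen
def primeOf (alpha_to_prime : List (String × Int)) (c : Char) : Int :=
  (PySem.Dict.mk alpha_to_prime).getD (String.mk [c]) 0

-- first loop: hash_table[(i, i+1)] = alpha_to_prime[s[i]]
def phase1A (alpha_to_prime : List (String × Int)) (cs : List Char) : PySem.Dict (Int × Int) Int :=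
  (List.range cs.length).foldl
    (fun h (i : Nat) => h.insert ((i : Int), (i : Int) + 1) (primeOf alpha_to_prime (cs.getD i ' ')))
    PySem.Dict.empty

-- second loop: for d in range(2, n+1): for i in range(n+1-d): table lookup recurrence
-- (the getD default 0 is never used: the key (i, i+d-1) is always present)
def phase2A (alpha_to_prime : List (String × Int)) (cs : List Char) : PySem.Dict (Int × Int) Int :=
  (List.range' 2 (cs.length - 1)).foldl
    (fun h (d : Nat) =>
      (List.range (cs.length + 1 - d)).foldl
        (fun h (i : Nat) =>
          h.insert ((i : Int), (i : Int) + (d : Int))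
            (h.getD ((i : Int), (i : Int) + (d : Int) - 1) 0 *
              primeOf alpha_to_prime (cs.getD (i + d - 1) ' ')))
        h)
    (phase1A alpha_to_prime cs)

def build_hash_table_py (s : String) (alpha_to_prime : List (String × Int)) : List (Int × Int × Int) :=
  (phase2A alpha_to_prime s.toList).items.map (fun p => (p.1.1, p.1.2, p.2))

-- ===== PORT B =====
-- _seg_prod: p = 1; for c in s[i:j]: p *= alpha_to_prime[c]; return p
def segProdB (alpha_to_prime : List (String × Int)) (cs : List Char) (i j : Int) : Int :=
  (PySem.List.slice cs (some i) (some j)).foldl (fun p c => p * primeOf alpha_to_prime c) 1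

-- the dict-comprehension pair list: (i, i+d) -> _seg_prod(s, ap, i, i+d)
def pairsB (alpha_to_prime : List (String × Int)) (cs : List Char) : List ((Int × Int) × Int) :=
  (List.range' 1 cs.length).flatMap
    (fun (d : Nat) =>
      (List.range (cs.length + 1 - d)).map
        (fun (i : Nat) =>
          (((i : Int), (i : Int) + (d : Int)),
            segProdB alpha_to_prime cs (i : Int) ((i : Int) + (d : Int)))))

def build_hash_table_py_alt (s : String) (alpha_to_prime : List (String × Int)) : List (Int × Int × Int) :=
  (((pairsB alpha_to_prime s.toList).foldl
      (fun (h : PySem.Dict (Int × Int) Int) p => h.insert p.1 p.2)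
      PySem.Dict.empty).items).map (fun p => (p.1.1, p.1.2, p.2))

-- ===== PRECONDITION & SPEC =====
-- Pre_ excludes exactly the inputs on which Python A raises KeyError: a character of s missing from alpha_to_prime.
def Pre_build_hash_table_py (s : String) (alpha_to_prime : List (String × Int)) : Prop :=
  (s.toList.all (fun c => (PySem.Dict.mk alpha_to_prime).contains (String.mk [c]))) = true
instance (s : String) (alpha_to_prime : List (String × Int)) : Decidable (Pre_build_hash_table_py s alpha_to_prime) := by unfold Pre_build_hash_table_py; infer_instance

def pvWitness_build_hash_table_py : String × (List (String × Int)) := ("ab", [("a", 2), ("b", 3)])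

def Spec_build_hash_table_py (s : String) (alpha_to_prime : List (String × Int)) (out : List (Int × Int × Int)) : Prop := out = build_hash_table_py_alt s alpha_to_prime
instance (s : String) (alpha_to_prime : List (String × Int)) (out : List (Int × Int × Int)) : Decidable (Spec_build_hash_table_py s alpha_to_prime out) := by unfold Spec_build_hash_table_py; infer_instance

-- ===== CLAIM (what is proved, stated in full; the proofs are below) =====
def Claim_equal_build_hash_table_py : Prop := ∀ (s : String) (alpha_to_prime : List (String × Int)), Dom_build_hash_table_py s alpha_to_prime → Pre_build_hash_table_py s alpha_to_prime → Spec_build_hash_table_py s alpha_to_prime (build_hash_table_py s alpha_to_prime)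

-- ===== LEMMAS AND PROOFS =====

-- product of the primes of a character list, and of the substring s[i:i+d]
def vlist (ap : List (String × Int)) (l : List Char) : Int :=
  l.foldl (fun a c => a * primeOf ap c) 1

def pval (ap : List (String × Int)) (cs : List Char) (i d : Nat) : Int :=
  vlist ap ((cs.drop i).take d)

def keyND (i d : Nat) : Int × Int := ((i : Int), (i : Int) + (d : Int))

-- the entries of length d, in index order, and the full table after lengths 1..m
def blkT (ap : List (String × Int)) (cs : List Char) (d : Nat) : List ((Int × Int) × Int) :=
  (List.range (cs.length + 1 - d)).map (fun (i : Nat) => (keyND i d, pval ap cs i d))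

def upTo (ap : List (String × Int)) (cs : List Char) (m : Nat) : List ((Int × Int) × Int) :=
  (List.range' 1 m).flatMap (blkT ap cs)

lemma vlist_init (ap : List (String × Int)) (l : List Char) (a : Int) :
    l.foldl (fun x c => x * primeOf ap c) a = a * vlist ap l := by
  induction l generalizing a with
  | nil => simp [vlist]
  | cons c l ih =>
    simp only [List.foldl_cons, vlist]
    rw [ih, ih (1 * primeOf ap c)]
    ring

lemma pval_one (ap : List (String × Int)) (cs : List Char) (i : Nat) (h : i < cs.length) :
    pval ap cs i 1 = primeOf ap (cs.getD i ' ') := by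
  have h1 : (cs.drop i).take 1 = [cs[i]] := by
    rw [List.drop_eq_getElem_cons h]
    rfl
  unfold pval vlist
  rw [h1]
  simp [List.getD, List.getElem?_eq_getElem h]

lemma pval_succ (ap : List (String × Int)) (cs : List Char) (i d : Nat) (h : i + d < cs.length) :
    pval ap cs i (d + 1) = pval ap cs i d * primeOf ap (cs.getD (i + d) ' ') := by
  unfold pval
  have hd : d < (cs.drop i).length := by simp [List.length_drop]; omega
  rw [List.take_succ]
  have : (cs.drop i)[d]? = some cs[i + d] := by
    rw [List.getElem?_drop]
    exact List.getElem?_eq_getElem h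
  rw [this]
  unfold vlist
  simp only [Option.toList_some, List.foldl_append, List.foldl_cons, List.foldl_nil]
  rw [vlist_init]
  simp [List.getD, List.getElem?_eq_getElem h, vlist]

lemma mem_upTo (ap : List (String × Int)) (cs : List Char) (m : Nat) (p : (Int × Int) × Int) :
    p ∈ upTo ap cs m ↔ ∃ d i, 1 ≤ d ∧ d < 1 + m ∧ i < cs.length + 1 - d ∧ p = (keyND i d, pval ap cs i d) := by
  simp only [upTo, List.mem_flatMap, List.mem_range'_1, blkT, List.mem_map, List.mem_range]
  constructor
  · rintro ⟨d, ⟨h1, h2⟩, i, hi, rfl⟩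
    exact ⟨d, i, h1, h2, hi, rfl⟩
  · rintro ⟨d, i, h1, h2, hi, rfl⟩
    exact ⟨d, ⟨h1, h2⟩, i, hi, rfl⟩

lemma gap_upTo (ap : List (String × Int)) (cs : List Char) (m : Nat) (p : (Int × Int) × Int)
    (hp : p ∈ upTo ap cs m) : 1 ≤ p.1.2 - p.1.1 ∧ p.1.2 - p.1.1 ≤ (m : Int) := by
  rcases (mem_upTo ap cs m p).1 hp with ⟨d, i, h1, h2, _, rfl⟩
  simp only [keyND]
  constructor
  · have : ((1 : Nat) : Int) ≤ (d : Int) := by exact_mod_cast h1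
    omega
  · have : (d : Int) ≤ (m : Int) := by exact_mod_cast Nat.lt_succ_iff.mp (by omega)
    omega

lemma upTo_succ (ap : List (String × Int)) (cs : List Char) (m : Nat) :
    upTo ap cs (m + 1) = upTo ap cs m ++ blkT ap cs (m + 1) := by
  unfold upTo
  rw [List.range'_1_concat, List.flatMap_append]
  simp [Nat.add_comm]

lemma phase1A_items (ap : List (String × Int)) (cs : List Char) :
    (phase1A ap cs).items = upTo ap cs 1 ∧ (phase1A ap cs).keys.Nodup := by
  unfold phase1A
  have hfresh : ∀ i ∈ List.range cs.length,
      (PySem.Dict.empty : PySem.Dict (Int × Int) Int).contains ((i : Int), (i : Int) + 1) = false := by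
    intro i _
    exact PySem.Dict.contains_empty _
  have hnd : ((List.range cs.length).map (fun (i : Nat) => (((i : Int)), (i : Int) + 1))).Nodup := by
    refine List.Nodup.map ?_ (List.nodup_range)
    intro a b hab
    simp only [Prod.mk.injEq] at hab
    exact_mod_cast hab.1
  constructor
  · rw [PySem.Dict.items_foldl_insert_fresh _ _ _ _ hfresh hnd]
    unfold upTo blkT
    simp only [List.range'_one, List.flatMap_cons, List.flatMap_nil, List.append_nil,
      Nat.add_sub_cancel]
    rw [show (PySem.Dict.empty : PySem.Dict (Int × Int) Int).items = [] from rfl, List.nil_append]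
    apply List.map_congr_left
    intro i hi
    rw [pval_one ap cs i (List.mem_range.mp hi)]
    simp [keyND]
  · exact PySem.Dict.nodup_keys_foldl_insert_key _ _ _ _ PySem.Dict.nodup_keys_empty

lemma innerA (ap : List (String × Int)) (cs : List Char) (d : Nat) (h2 : 2 ≤ d) :
    ∀ (b a : Nat), a + b ≤ cs.length + 1 - d →
    ∀ (H : PySem.Dict (Int × Int) Int),
      H.items = upTo ap cs (d - 1) ++ (List.range a).map (fun (i : Nat) => (keyND i d, pval ap cs i d)) →
      H.keys.Nodup →
      ((List.range' a b).foldl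
        (fun h (i : Nat) =>
          h.insert ((i : Int), (i : Int) + (d : Int))
            (h.getD ((i : Int), (i : Int) + (d : Int) - 1) 0 * primeOf ap (cs.getD (i + d - 1) ' ')))
        H).items = upTo ap cs (d - 1) ++ (List.range (a + b)).map (fun (i : Nat) => (keyND i d, pval ap cs i d)) ∧
      ((List.range' a b).foldl
        (fun h (i : Nat) =>
          h.insert ((i : Int), (i : Int) + (d : Int))
            (h.getD ((i : Int), (i : Int) + (d : Int) - 1) 0 * primeOf ap (cs.getD (i + d - 1) ' ')))
        H).keys.Nodup := by
  intro b
  induction b with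
  | zero =>
    intro a hab H hit hnd
    simpa using ⟨hit, hnd⟩
  | succ b ih =>
    intro a hab H hit hnd
    rw [List.range'_succ]
    simp only [List.foldl_cons]
    have hkeys : H.keys
        = (upTo ap cs (d - 1)
            ++ (List.range a).map (fun i => (keyND i d, pval ap cs i d))).map Prod.fst := by
      simp only [PySem.Dict.keys]
      rw [hit]
    have hnotmem : ((a : Int), (a : Int) + (d : Int)) ∉ H.keys := by
      rw [hkeys]
      simp only [List.map_append, List.mem_append]
      rintro (hmem | hmem)
      · obtain ⟨p, hp, hpe⟩ := List.mem_map.mp hmem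
        have hg := (gap_upTo ap cs (d - 1) p hp).2
        rw [hpe] at hg
        simp only at hg
        have hcast : ((d - 1 : Nat) : Int) = (d : Int) - 1 := by
          push_cast [Nat.cast_sub (by omega : 1 ≤ d)]
          ring
        rw [hcast] at hg
        omega
      · obtain ⟨i, hi, hpe⟩ := List.mem_map.mp hmem
        obtain ⟨j, hj, rfl⟩ := List.mem_map.mp hi
        simp only [keyND, Prod.mk.injEq] at hpe
        have hja : j = a := by exact_mod_cast hpe.1
        have := List.mem_range.mp hj
        omega
    have hcon : H.contains ((a : Int), (a : Int) + (d : Int)) = false := by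
      rw [PySem.Dict.contains_eq_decide_mem_keys]
      simpa using hnotmem
    have hget : H.getD ((a : Int), (a : Int) + (d : Int) - 1) 0 = pval ap cs a (d - 1) := by
      have hkey : ((a : Int), (a : Int) + (d : Int) - 1) = keyND a (d - 1) := by
        have ec : (a : Int) + (d : Int) - 1 = (a : Int) + ((d - 1 : Nat) : Int) := by
          push_cast [Nat.cast_sub (by omega : 1 ≤ d)]
          ring
        simp [keyND, ec]
      have hmem : (keyND a (d - 1), pval ap cs a (d - 1)) ∈ H.items := by
        rw [hit]
        apply List.mem_append_left
        exact (mem_upTo ap cs (d - 1) _).2 ⟨d - 1, a, by omega, by omega, by omega, rfl⟩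
      rw [hkey]
      exact PySem.Dict.getD_of_mem_items H hmem hnd 0
    have hval : pval ap cs a (d - 1) * primeOf ap (cs.getD (a + d - 1) ' ') = pval ap cs a d := by
      have hlt : a + (d - 1) < cs.length := by omega
      have hs := pval_succ ap cs a (d - 1) hlt
      have e1 : d - 1 + 1 = d := by omega
      have e2 : a + (d - 1) = a + d - 1 := by omega
      rw [e1, e2] at hs
      exact hs.symm
    have hins_items : (H.insert ((a : Int), (a : Int) + (d : Int))
          (H.getD ((a : Int), (a : Int) + (d : Int) - 1) 0 * primeOf ap (cs.getD (a + d - 1) ' '))).items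
        = upTo ap cs (d - 1) ++ (List.range (a + 1)).map (fun i => (keyND i d, pval ap cs i d)) := by
      rw [PySem.Dict.items_insert_of_not_contains H _ hcon, hit, hget, hval]
      rw [List.range_succ]
      simp [keyND, List.append_assoc]
    have hins_nd : (H.insert ((a : Int), (a : Int) + (d : Int))
          (H.getD ((a : Int), (a : Int) + (d : Int) - 1) 0 * primeOf ap (cs.getD (a + d - 1) ' '))).keys.Nodup := by
      rw [PySem.Dict.keys_insert_of_not_contains H _ hcon]
      refine List.nodup_append.2 ⟨hnd, List.nodup_singleton _, ?_⟩
      intro p hp q hq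
      rw [List.mem_singleton] at hq
      subst hq
      exact fun hpq => hnotmem (hpq ▸ hp)
    have hres := ih (a + 1) (by omega) _ hins_items hins_nd
    have e : a + 1 + b = a + (b + 1) := by omega
    rw [e] at hres
    exact hres

lemma outerA (ap : List (String × Int)) (cs : List Char) :
    ∀ (t a : Nat), 2 ≤ a → a + t ≤ cs.length + 2 →
    ∀ (H : PySem.Dict (Int × Int) Int),
      H.items = upTo ap cs (a - 1) → H.keys.Nodup →
      (((List.range' a t).foldl
          (fun h (d : Nat) =>
            (List.range (cs.length + 1 - d)).foldl
              (fun h (i : Nat) =>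
                h.insert ((i : Int), (i : Int) + (d : Int))
                  (h.getD ((i : Int), (i : Int) + (d : Int) - 1) 0 * primeOf ap (cs.getD (i + d - 1) ' ')))
              h)
          H).items = upTo ap cs (a - 1 + t)) ∧
      ((List.range' a t).foldl
          (fun h (d : Nat) =>
            (List.range (cs.length + 1 - d)).foldl
              (fun h (i : Nat) =>
                h.insert ((i : Int), (i : Int) + (d : Int))
                  (h.getD ((i : Int), (i : Int) + (d : Int) - 1) 0 * primeOf ap (cs.getD (i + d - 1) ' ')))
              h)
          H).keys.Nodup := by
  intro t
  induction t with
  | zero =>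
    intro a h2a hta H hit hnd
    simpa using ⟨hit, hnd⟩
  | succ t ih =>
    intro a h2a hta H hit hnd
    rw [List.range'_succ]
    simp only [List.foldl_cons]
    have hinner := innerA ap cs a h2a (cs.length + 1 - a) 0 (by omega) H (by simpa using hit) hnd
    rw [← List.range_eq_range'] at hinner
    have hitems : ((List.range (cs.length + 1 - a)).foldl
        (fun h (i : Nat) =>
          h.insert ((i : Int), (i : Int) + (a : Int))
            (h.getD ((i : Int), (i : Int) + (a : Int) - 1) 0 * primeOf ap (cs.getD (i + a - 1) ' ')))
        H).items = upTo ap cs a := by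
      rw [hinner.1]
      have e : a = (a - 1) + 1 := by omega
      rw [show upTo ap cs a = upTo ap cs (a - 1) ++ blkT ap cs ((a - 1) + 1) by rw [← e]; rw [e, upTo_succ, ← e]]
      rw [← e]
      congr 1
      unfold blkT
      simp
    have hres := ih (a + 1) (by omega) (by omega) _ hitems hinner.2
    have e2 : a + 1 - 1 + t = a - 1 + (t + 1) := by omega
    rw [e2] at hres
    exact hres

lemma phase2A_items (ap : List (String × Int)) (cs : List Char) :
    (phase2A ap cs).items = upTo ap cs cs.length ∧ (phase2A ap cs).keys.Nodup := by
  unfold phase2A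
  have h1 := phase1A_items ap cs
  have hres := outerA ap cs (cs.length - 1) 2 (by omega) (by omega) (phase1A ap cs) (by simpa using h1.1) h1.2
  rcases hres with ⟨hitems, hnd⟩
  refine ⟨?_, hnd⟩
  rw [hitems]
  by_cases hn : cs.length = 0
  · have hcs : cs = [] := List.length_eq_zero_iff.mp hn
    subst hcs
    unfold upTo blkT
    simp
  · have e : 2 - 1 + (cs.length - 1) = cs.length := by omega
    rw [e]

-- the brute-force product over the slice is exactly pval
lemma segProdB_eq (ap : List (String × Int)) (cs : List Char) (i d : Nat) :
    segProdB ap cs (i : Int) ((i : Int) + (d : Int)) = pval ap cs i d := by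
  unfold segProdB
  rw [PySem.List.slice_natCast_add]
  rfl

lemma pairsB_eq (ap : List (String × Int)) (cs : List Char) :
    pairsB ap cs = upTo ap cs cs.length := by
  unfold pairsB upTo
  apply List.flatMap_congr
  intro d hd
  unfold blkT
  apply List.map_congr_left
  intro i hi
  rw [segProdB_eq]
  rfl

lemma foldl_pairs_items (l : List ((Int × Int) × Int)) :
    ∀ (H : PySem.Dict (Int × Int) Int),
      (∀ p ∈ l, H.contains p.1 = false) → (l.map Prod.fst).Nodup →
      (l.foldl (fun h p => h.insert p.1 p.2) H).items = H.items ++ l := by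
  induction l with
  | nil =>
    intro H _ _
    simp
  | cons p l ih =>
    intro H hf hnd
    simp only [List.foldl_cons]
    have hc : H.contains p.1 = false := hf p (List.mem_cons_self ..)
    simp only [List.map_cons, List.nodup_cons] at hnd
    have hf' : ∀ q ∈ l, (H.insert p.1 p.2).contains q.1 = false := by
      intro q hq
      rw [PySem.Dict.contains_insert]
      have h1 : (q.1 == p.1) = false := by
        rw [beq_eq_false_iff_ne]
        intro hqp
        exact hnd.1 (hqp ▸ List.mem_map_of_mem hq)
      rw [h1, hf q (List.mem_cons_of_mem _ hq)]
      rfl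
    rw [ih _ hf' hnd.2, PySem.Dict.items_insert_of_not_contains H _ hc]
    simp

lemma ports_eq (ap : List (String × Int)) (s : String) :
    build_hash_table_py s ap = build_hash_table_py_alt s ap := by
  unfold build_hash_table_py build_hash_table_py_alt
  have hA := phase2A_items ap s.toList
  have hBk : ((pairsB ap s.toList).map Prod.fst).Nodup := by
    rw [pairsB_eq]
    have hk := hA.2
    simp only [PySem.Dict.keys] at hk
    rw [hA.1] at hk
    exact hk
  rw [foldl_pairs_items _ _ (fun p _ => PySem.Dict.contains_empty _) hBk]
  rw [show (PySem.Dict.empty : PySem.Dict (Int × Int) Int).items = [] from rfl,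
    List.nil_append, pairsB_eq, hA.1]

-- ===== VERDICT (by name: the statement is the Claim_ definition above) =====
theorem build_hash_table_py_spec : Claim_equal_build_hash_table_py := by
  intro s ap _ _
  unfold Spec_build_hash_table_py
  exact ports_eq ap s
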